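-- pv_equiv track=rewrite | github.com/Hilyme/Python-Quantitative_Indicators | finance_utils/entangling_theory.py | TDX_BACKSET
-- ===== SOURCE A (Python) =====
-- def TDX_BACKSET(rec_list, n):
--     res_list = []
--     for i in range(len(rec_list)):
--         if rec_list[i]:
--             if len(res_list) < n:
--                 res_list = [True] * (len(res_list) + 1)
--             else:
--                 res_list[i - n + 1:] = [True] * n
--         else:
--             res_list.append(False)
--     return res_list
-- ===== SOURCE B (Python) =====
-- def TDX_BACKSET(rec_list, n):
--     # Single reverse pass: track distance to the nearest True at or after each
--     # position; a bar is marked iff that distance is < n.  O(len) vs A's O(len*n).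
--     out = []
--     dist = None
--     for x in reversed(rec_list):
--         dist = 0 if x else (None if dist is None else dist + 1)
--         out.append(dist is not None and dist < n)
--     out.reverse()
--     return out
-- ===== Notes on version B (the rewrite author's own statement) =====
-- stated objective: faster
-- what changed: Replaces the forward loop that rewrites the last n slots (or the whole list) on every True signal with a single reverse pass that tracks the distance to the nearest upcoming True and emits one bool per bar.
-- outside the precondition, e.g. on TDX_BACKSET([True, False], 0): A returns [False], B returns [False, False]
import Mathlib
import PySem

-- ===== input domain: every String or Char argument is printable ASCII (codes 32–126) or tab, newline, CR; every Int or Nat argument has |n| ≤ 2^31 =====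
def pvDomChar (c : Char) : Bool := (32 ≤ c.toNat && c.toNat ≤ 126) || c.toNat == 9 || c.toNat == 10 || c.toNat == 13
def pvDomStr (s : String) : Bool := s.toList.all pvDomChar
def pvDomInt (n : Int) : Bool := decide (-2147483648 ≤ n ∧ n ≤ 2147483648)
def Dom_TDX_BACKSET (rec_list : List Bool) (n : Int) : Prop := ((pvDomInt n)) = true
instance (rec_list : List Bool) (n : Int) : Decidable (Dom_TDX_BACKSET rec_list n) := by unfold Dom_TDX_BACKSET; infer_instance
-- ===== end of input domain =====

-- B replaces A's forward loop (which rewrites the last n slots on every True) by one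
-- reverse pass tracking the distance to the nearest upcoming True: faster (O(len) vs O(len*n)).

-- ===== PORT A =====
-- loop body of A (res_list is the accumulator, i the loop index)
def stepA (rec_list : List Bool) (n : Int) (res_list : List Bool) (i : Int) : List Bool :=
  if PySem.List.pyGetD rec_list i false then
    if (res_list.length : Int) < n then
      List.replicate (res_list.length + 1) true
    else
      -- res_list[i - n + 1:] = [True] * n
      PySem.List.slice res_list none (some (i - n + 1)) ++ List.replicate n.toNat true
  else
    res_list ++ [false]

def TDX_BACKSET (rec_list : List Bool) (n : Int) : List Bool :=
  (PySem.List.pyRange 0 rec_list.length 1).foldl (stepA rec_list n) []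

-- ===== PORT B =====
-- one step of B's reverse pass: update the distance to the nearest True, emit one bool
def stepB (n : Int) (x : Bool) (st : Option Int × List Bool) : Option Int × List Bool :=
  let dist : Option Int := if x then some 0 else st.1.map (· + 1)
  (dist, (match dist with | some k => decide (k < n) | none => false) :: st.2)

def TDX_BACKSET_alt (rec_list : List Bool) (n : Int) : List Bool :=
  (rec_list.foldr (stepB n) (none, [])).2

-- ===== PRECONDITION & SPEC =====
-- Pre_ restricts to the natural domain n ≥ 1 (a backset width must be positive): for n ≤ 0
-- A's slice assignment silently drops one output element per True signal, an accident of
-- its implementation, while B naturally keeps the full length.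
def Pre_TDX_BACKSET (rec_list : List Bool) (n : Int) : Prop := 1 ≤ n
instance (rec_list : List Bool) (n : Int) : Decidable (Pre_TDX_BACKSET rec_list n) := by unfold Pre_TDX_BACKSET; infer_instance
def pvWitness_TDX_BACKSET : List Bool × Int := ([true, false, false, true], 2)

def Spec_TDX_BACKSET (rec_list : List Bool) (n : Int) (out : List Bool) : Prop := out = TDX_BACKSET_alt rec_list n
instance (rec_list : List Bool) (n : Int) (out : List Bool) : Decidable (Spec_TDX_BACKSET rec_list n out) := by unfold Spec_TDX_BACKSET; infer_instance

-- ===== CLAIM (what is proved, stated in full; the proofs are below) =====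
def Claim_equal_TDX_BACKSET : Prop := ∀ (rec_list : List Bool) (n : Int), Dom_TDX_BACKSET rec_list n → Pre_TDX_BACKSET rec_list n → Spec_TDX_BACKSET rec_list n (TDX_BACKSET rec_list n)

-- ===== LEMMAS AND PROOFS =====

-- common specification: bar j is marked iff some True lies in the window [j, j+n)
def win (l : List Bool) (n' j : Nat) : Bool := decide (∃ k < j + n', j ≤ k ∧ l.getD k false = true)

def spec (l : List Bool) (n : Int) : List Bool := (List.range l.length).map (win l n.toNat)

lemma spec_length (l : List Bool) (n : Int) : (spec l n).length = l.length := by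
  simp [spec]

lemma spec_getElem (l : List Bool) (n : Int) (j : Nat) (h : j < (spec l n).length) :
    (spec l n)[j] = win l n.toNat j := by
  simp [spec]

lemma getD_take (l : List Bool) (m k : Nat) :
    (l.take m).getD k false = if k < m then l.getD k false else false := by
  by_cases h : k < m
  · simp [List.getD_eq_getElem?_getD, h]
  · simp [List.getD_eq_getElem?_getD, h]

-- ----- B = spec -----

def distOf : List Bool → Option Int
  | [] => none
  | true :: _ => some 0
  | false :: xs => (distOf xs).map (· + 1)

lemma win_cons_succ (x : Bool) (xs : List Bool) (n' j : Nat) :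
    win (x :: xs) n' (j + 1) = win xs n' j := by
  unfold win
  rw [decide_eq_decide]
  constructor
  · rintro ⟨k, hk, hjk, hget⟩
    match k, hjk with
    | (k' + 1), _ =>
      exact ⟨k', by omega, by omega, by simpa using hget⟩
  · rintro ⟨k, hk, hjk, hget⟩
    exact ⟨k + 1, by omega, by omega, by simpa using hget⟩

lemma spec_cons (x : Bool) (xs : List Bool) (n : Int) :
    spec (x :: xs) n = win (x :: xs) n.toNat 0 :: spec xs n := by
  unfold spec
  rw [List.length_cons, List.range_succ_eq_map, List.map_cons, List.map_map]
  congr 1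
  apply List.map_congr_left
  intro j _
  simpa [Function.comp] using win_cons_succ x xs n.toNat j

lemma win_cons_false (xs : List Bool) (n : Int) :
    win (false :: xs) n.toNat 0 = win xs (n - 1).toNat 0 := by
  unfold win
  rw [decide_eq_decide]
  constructor
  · rintro ⟨k, hk, hjk, hget⟩
    match k, hget with
    | (k' + 1), hget =>
      exact ⟨k', by omega, by omega, by simpa using hget⟩
    | 0, hget => simp at hget
  · rintro ⟨k, hk, hjk, hget⟩
    exact ⟨k + 1, by omega, by omega, by simpa using hget⟩

lemma head_win (l : List Bool) (n : Int) :
    (match distOf l with | some k => decide (k < n) | none => false) = win l n.toNat 0 := by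
  induction l generalizing n with
  | nil =>
    simp [distOf, win]
  | cons x xs ih =>
    cases x with
    | true =>
      simp only [distOf]
      unfold win
      rw [decide_eq_decide]
      constructor
      · intro h
        exact ⟨0, by omega, by omega, by simp⟩
      · rintro ⟨k, hk, -, -⟩
        omega
    | false =>
      simp only [distOf]
      have hih := ih (n := n - 1)
      rw [win_cons_false]
      rcases hd : distOf xs with _ | k <;> rw [hd] at hih
      · simpa using hih
      · simp only [Option.map_some]
        have hdec : decide (k + 1 < n) = decide (k < n - 1) := by
          rw [decide_eq_decide]; omega
        show decide (k + 1 < n) = win xs (n - 1).toNat 0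
        rw [hdec]
        simpa using hih

lemma foldr_stepB (l : List Bool) (n : Int) :
    l.foldr (stepB n) (none, []) = (distOf l, spec l n) := by
  induction l with
  | nil => simp [distOf, spec]
  | cons x xs ih =>
    rw [List.foldr_cons, ih, spec_cons]
    unfold stepB
    have hdist : (if x then some 0 else (distOf xs).map (· + 1)) = distOf (x :: xs) := by
      cases x <;> simp [distOf]
    simp only [hdist]
    exact Prod.ext rfl (by rw [head_win])

lemma alt_eq_spec (l : List Bool) (n : Int) : TDX_BACKSET_alt l n = spec l n := by
  unfold TDX_BACKSET_alt
  rw [foldr_stepB]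

-- ----- A = spec on n ≥ 1 -----

lemma key_step (l : List Bool) (n : Int) (hn : 1 ≤ n) {i : Nat} (hi : i < l.length) :
    stepA l n (spec (l.take i) n) (i : Int) = spec (l.take (i + 1)) n := by
  have hlen : (spec (l.take i) n).length = i := by
    rw [spec_length, List.length_take]; omega
  have hlen1 : (l.take (i+1)).length = i + 1 := by rw [List.length_take]; omega
  unfold stepA
  rw [PySem.List.pyGetD_natCast, hlen]
  by_cases hx : l.getD i false = true
  · rw [if_pos hx]
    by_cases hc : (i : Int) < n
    · rw [if_pos hc]
      apply List.ext_getElem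
      · simp [spec_length, hlen1]
      · intro j h1 h2
        rw [List.getElem_replicate, spec_getElem]
        have hj : j < i + 1 := by
          rw [List.length_replicate] at h1; omega
        symm
        unfold win
        rw [decide_eq_true_eq]
        refine ⟨i, by omega, by omega, ?_⟩
        rw [getD_take, if_pos (by omega)]; exact hx
    · rw [if_neg hc]
      have hn' : n.toNat ≤ i := by omega
      have hn1 : 1 ≤ n.toNat := by omega
      rw [PySem.List.slice_to _ (by omega : (0:Int) ≤ (i : Int) - n + 1)]
      have htn : ((i : Int) - n + 1).toNat = i - n.toNat + 1 := by omega
      rw [htn]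
      apply List.ext_getElem
      · simp only [List.length_append, List.length_take, List.length_replicate,
          spec_length, List.length_take, hlen1]
        omega
      · intro j h1 h2
        have hj : j < i + 1 := by rw [spec_length, hlen1] at h2; exact h2
        rw [spec_getElem]
        have hltake : ((spec (l.take i) n).take (i - n.toNat + 1)).length = i - n.toNat + 1 := by
          rw [List.length_take, hlen]; omega
        by_cases hcase : j < i - n.toNat + 1
        · rw [List.getElem_append_left (by rw [hltake]; exact hcase),
            List.getElem_take, spec_getElem]
          unfold win
          rw [decide_eq_decide]
          constructor
          · rintro ⟨k, hk, hjk, hget⟩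
            rw [getD_take] at hget
            by_cases hki : k < i
            · rw [if_pos hki] at hget
              exact ⟨k, hk, hjk, by rw [getD_take, if_pos (by omega)]; exact hget⟩
            · rw [if_neg hki] at hget; simp at hget
          · rintro ⟨k, hk, hjk, hget⟩
            rw [getD_take] at hget
            by_cases hki : k < i + 1
            · rw [if_pos hki] at hget
              exact ⟨k, hk, hjk, by rw [getD_take, if_pos (by omega)]; exact hget⟩
            · rw [if_neg hki] at hget; simp at hget
        · rw [List.getElem_append_right (by rw [hltake]; omega), List.getElem_replicate]
          symm
          unfold win
          rw [decide_eq_true_eq]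
          refine ⟨i, by omega, by omega, ?_⟩
          rw [getD_take, if_pos (by omega)]; exact hx
  · rw [if_neg hx]
    have hxf : l.getD i false = false := by cases h : l.getD i false <;> simp_all
    apply List.ext_getElem
    · simp [spec_length, hlen1, hlen]
    · intro j h1 h2
      have hj : j < i + 1 := by
        rw [List.length_append, hlen] at h1; simpa using h1
      rw [spec_getElem]
      by_cases hji : j < i
      · rw [List.getElem_append_left (by rw [hlen]; exact hji), spec_getElem]
        unfold win
        rw [decide_eq_decide]
        constructor
        · rintro ⟨k, hk, hjk, hget⟩
          rw [getD_take] at hget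
          by_cases hki : k < i
          · rw [if_pos hki] at hget
            exact ⟨k, hk, hjk, by rw [getD_take, if_pos (by omega)]; exact hget⟩
          · rw [if_neg hki] at hget; simp at hget
        · rintro ⟨k, hk, hjk, hget⟩
          rw [getD_take] at hget
          by_cases hki : k < i + 1
          · rw [if_pos hki] at hget
            by_cases hke : k = i
            · subst hke; rw [hxf] at hget; simp at hget
            · exact ⟨k, hk, hjk, by rw [getD_take, if_pos (by omega)]; exact hget⟩
          · rw [if_neg hki] at hget; simp at hget
      · have hje : j = i := by omega
        subst hje
        rw [List.getElem_append_right (by rw [hlen])]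
        simp only [hlen, Nat.sub_self, List.getElem_cons_zero]
        symm
        unfold win
        rw [decide_eq_false_iff_not]
        rintro ⟨k, hk, hjk, hget⟩
        rw [getD_take] at hget
        by_cases hki : k < j + 1
        · rw [if_pos hki] at hget
          have : k = j := by omega
          subst this
          rw [hxf] at hget; simp at hget
        · rw [if_neg hki] at hget; simp at hget

lemma A_loop (l : List Bool) (n : Int) (hn : 1 ≤ n) :
    ∀ i, i ≤ l.length →
      (List.range i).foldl (fun res (k : Nat) => stepA l n res (k : Int)) [] = spec (l.take i) n := by
  intro i
  induction i with
  | zero => intro _; simp [spec]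
  | succ i ih =>
    intro h
    rw [List.range_succ, List.foldl_append, ih (by omega)]
    simpa using key_step l n hn (by omega : i < l.length)

lemma A_eq_spec (l : List Bool) (n : Int) (hn : 1 ≤ n) : TDX_BACKSET l n = spec l n := by
  unfold TDX_BACKSET
  rw [PySem.List.pyRange_one]
  have h1 : (((l.length : Int)) - 0).toNat = l.length := by omega
  rw [h1, List.foldl_map]
  simp only [zero_add]
  rw [A_loop l n hn l.length (le_refl _), List.take_length]

-- ===== VERDICT (by name: the statement is the Claim_ definition above) =====
theorem TDX_BACKSET_spec : Claim_equal_TDX_BACKSET := by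
  intro rec_list n _ hpre
  unfold Spec_TDX_BACKSET
  rw [A_eq_spec rec_list n hpre, alt_eq_spec]
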